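-- pv_equiv track=rewrite | github.com/TuringTrain/lyrics_thumbnailing | listtools.py | dense_to_sparse
-- ===== SOURCE A (Python) =====
-- def dense_to_sparse(indices, length):
--     sparse = []
--     indices_set = set(indices)
--     for index in range(length):
--         if index in indices_set:
--             sparse.append(1)
--         else:
--             sparse.append(0)
--     return sparse
-- ===== SOURCE B (Python) =====
-- def dense_to_sparse(indices, length):
--     sparse = [0] * length
--     for index in indices:
--         if 0 <= index < length:
--             sparse[index] = 1
--     return sparse
-- ===== Notes on version B (the rewrite author's own statement) =====
-- stated objective: faster
-- what changed: B scatters: it preallocates a zero list and writes 1 at each in-range index, instead of A's gather that builds a set and tests membership for every position of range(length).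
import Mathlib
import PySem

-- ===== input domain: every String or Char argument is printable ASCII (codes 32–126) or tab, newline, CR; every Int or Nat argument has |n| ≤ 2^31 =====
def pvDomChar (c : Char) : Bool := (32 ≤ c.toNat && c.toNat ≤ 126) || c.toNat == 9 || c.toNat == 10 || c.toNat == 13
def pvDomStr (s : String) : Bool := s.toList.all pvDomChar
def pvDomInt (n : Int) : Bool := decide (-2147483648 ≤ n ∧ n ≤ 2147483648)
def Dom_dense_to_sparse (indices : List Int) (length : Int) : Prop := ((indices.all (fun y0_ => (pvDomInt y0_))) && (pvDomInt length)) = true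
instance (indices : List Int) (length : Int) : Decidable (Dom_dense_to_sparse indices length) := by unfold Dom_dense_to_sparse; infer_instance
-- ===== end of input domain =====

-- B replaces A's gather (membership test at every position in range(length)) by a scatter
-- (preallocate zeros, write 1 at each in-range index); same result, no set construction.

-- ===== PORT A =====
def dense_to_sparse (indices : List Int) (length : Int) : List Int :=
  let indices_set : PySem.Set Int := PySem.Set.ofList indices
  (PySem.List.pyRange 0 length 1).foldl
    (fun sparse index =>
      if PySem.Set.contains indices_set index then sparse ++ [1] else sparse ++ [0]) []

-- ===== PORT B =====
def dense_to_sparse_alt (indices : List Int) (length : Int) : List Int :=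
  indices.foldl
    (fun sparse index =>
      if 0 ≤ index ∧ index < length then PySem.List.pySetD sparse index 1 else sparse)
    (List.replicate length.toNat 0)

-- ===== PRECONDITION & SPEC =====
def Spec_dense_to_sparse (indices : List Int) (length : Int) (out : List Int) : Prop := out = dense_to_sparse_alt indices length
instance (indices : List Int) (length : Int) (out : List Int) : Decidable (Spec_dense_to_sparse indices length out) := by unfold Spec_dense_to_sparse; infer_instance

-- ===== CLAIM (what is proved, stated in full; the proofs are below) =====
def Claim_equal_dense_to_sparse : Prop := ∀ (indices : List Int) (length : Int), Dom_dense_to_sparse indices length → Spec_dense_to_sparse indices length (dense_to_sparse indices length)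

-- ===== LEMMAS AND PROOFS =====

-- A as a map over range(length)
theorem A_eq_map (indices : List Int) (length : Int) :
    dense_to_sparse indices length =
      (PySem.List.pyRange 0 length 1).map
        (fun i => if PySem.Set.contains (PySem.Set.ofList indices) i then (1 : Int) else 0) := by
  unfold dense_to_sparse
  have hbody :
      (fun (sparse : List Int) (index : Int) =>
        if PySem.Set.contains (PySem.Set.ofList indices) index then sparse ++ [1] else sparse ++ [0])
      = fun sparse index =>
        sparse ++ [if PySem.Set.contains (PySem.Set.ofList indices) index then (1 : Int) else 0] := by
    funext sp i; split <;> rfl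
  simp only [hbody, PySem.List.foldl_append_singleton_eq_map, List.nil_append]

-- B's fold preserves the length of the accumulator
theorem B_length (length : Int) (indices : List Int) :
    ∀ (s : List Int),
      (indices.foldl
        (fun sparse index =>
          if 0 ≤ index ∧ index < length then PySem.List.pySetD sparse index 1 else sparse) s).length
      = s.length := by
  induction indices with
  | nil => intro s; rfl
  | cons i rest ih =>
    intro s
    simp only [List.foldl_cons]
    rw [ih]
    split
    · simp [PySem.List.length_pySetD]
    · rfl

-- what B's fold leaves at position k
theorem B_get (length : Int) (indices : List Int) :
    ∀ (s : List Int) (k : Nat), k < s.length → (k : Int) < length →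
      (indices.foldl
        (fun sparse index =>
          if 0 ≤ index ∧ index < length then PySem.List.pySetD sparse index 1 else sparse) s)[k]?
      = if (k : Int) ∈ indices then some 1 else s[k]? := by
  induction indices with
  | nil => intro s k _ _; simp
  | cons i rest ih =>
    intro s k hk hkL
    simp only [List.foldl_cons]
    by_cases hc : 0 ≤ i ∧ i < length
    · rw [if_pos hc,
        ih (PySem.List.pySetD s i 1) k (by rw [PySem.List.length_pySetD]; exact hk) hkL,
        PySem.List.pySetD_of_nonneg s 1 hc.1]
      by_cases hm : (k : Int) ∈ rest
      · simp [hm]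
      · by_cases hik : i = (k : Int)
        · have hkt : i.toNat = k := by omega
          rw [hkt, List.getElem?_set_self hk, if_neg hm,
            if_pos (by simp [List.mem_cons, hik.symm])]
        · have hne : i.toNat ≠ k := by omega
          rw [List.getElem?_set_ne hne, if_neg hm,
            if_neg (by simp [List.mem_cons, hm]; omega)]
    · rw [if_neg hc, ih s k hk hkL]
      by_cases hm : (k : Int) ∈ rest
      · simp [hm]
      · rw [if_neg hm, if_neg (by simp [List.mem_cons, hm]; omega)]

theorem main_eq (indices : List Int) (length : Int) :
    dense_to_sparse indices length = dense_to_sparse_alt indices length := by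
  rw [A_eq_map]
  unfold dense_to_sparse_alt
  by_cases hL : 0 ≤ length
  · obtain ⟨n, rfl⟩ := Int.eq_ofNat_of_zero_le hL
    apply List.ext_getElem?
    intro k
    by_cases hk : k < n
    · rw [PySem.List.getElem?_map_pyRange_zero _ _ _ hk]
      rw [B_get _ indices _ k (by simp [Int.toNat_natCast, hk]) (by exact_mod_cast hk)]
      by_cases hm : (k : Int) ∈ indices
      · simp [PySem.Set.contains, hm]
      · simp [PySem.Set.contains, hm, Int.toNat_natCast, hk]
    · have h1 : ((PySem.List.pyRange 0 (n : Int) 1).map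
          (fun i => if PySem.Set.contains (PySem.Set.ofList indices) i then (1 : Int) else 0))[k]? = none := by
        rw [List.getElem?_eq_none]
        simp [PySem.List.length_pyRange_one]; omega
      have h2 : (indices.foldl
          (fun sparse index =>
            if 0 ≤ index ∧ index < (n : Int) then PySem.List.pySetD sparse index 1 else sparse)
          (List.replicate (n : Int).toNat (0 : Int)))[k]? = none := by
        apply List.getElem?_eq_none
        rw [B_length]
        simp only [List.length_replicate, Int.toNat_natCast]
        omega
      exact h1.trans h2.symm
  · have h1 : PySem.List.pyRange 0 length 1 = [] := PySem.List.pyRange_one_eq_nil (by omega)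
    have h2 : length.toNat = 0 := by omega
    rw [h1, h2]
    have := B_length length indices (List.replicate 0 0)
    simp only [List.replicate_zero, List.length_nil] at this
    simpa [List.length_eq_zero_iff] using this

-- ===== VERDICT (by name: the statement is the Claim_ definition above) =====
theorem dense_to_sparse_spec : Claim_equal_dense_to_sparse := by
  intro indices length _
  unfold Spec_dense_to_sparse
  exact main_eq indices length
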